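-- pv_equiv track=rewrite | github.com/lversen/Internship | train_for_analyze_gptneo.py | generate_sample_texts
-- ===== SOURCE A (Python) =====
-- def generate_sample_texts(n=100):
--     """Generate diverse sample texts for training"""
--     # Different text types
--     text_types = [
--         # Technical content
--         [
--             "Neural networks process information through layers of interconnected nodes, each applying weights and activation functions to transform input data.",
--             "The transformer architecture revolutionized natural language processing by introducing self-attention mechanisms that capture long-range dependencies in text."
--         ],
--         # Creative writing
--         [
--             "The old oak tree stood sentinel at the edge of the forest, its gnarled branches reaching skyward like ancient fingers.",
--             "Moonlight spilled across the quiet lake, turning the rippling water into a canvas of liquid silver."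
--         ],
--         # News article
--         [
--             "Scientists announced today the discovery of a new exoplanet that may contain liquid water, raising hopes for finding extraterrestrial life.",
--             "Global markets rallied yesterday following the central bank's decision to lower interest rates in response to recent economic indicators."
--         ],
--         # Casual conversation
--         [
--             "Hey, did you catch that new movie last weekend? I thought the special effects were amazing but the plot was predictable.",
--             "We should meet up for coffee sometime next week. I've been wanting to tell you about my recent trip to Japan."
--         ],
--         # Academic writing
--         [
--             "The experiment yielded statistically significant results (p<0.01), suggesting a strong correlation between the variables under investigation.",
--             "This paper presents a comprehensive analysis of the socioeconomic factors contributing to urban development in post-industrial regions."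
--         ],
--         # Historical text
--         [
--             "In 1776, representatives from the thirteen colonies signed the Declaration of Independence, formally announcing their separation from Britain.",
--             "The Roman Empire reached its greatest territorial extent under the rule of Trajan, encompassing vast regions around the Mediterranean Sea."
--         ],
--         # Business writing
--         [
--             "The quarterly financial report indicates a 12% increase in revenue, driven primarily by strong performance in emerging markets.",
--             "Our five-year strategic plan aims to diversify product offerings while maintaining our core commitment to sustainability and ethical sourcing."
--         ],
--         # Medical text
--         [
--             "Patients presenting with these symptoms should be evaluated for possible autoimmune disorders, particularly those affecting the thyroid.",
--             "The study found that regular exercise significantly reduced the risk of cardiovascular disease, with benefits observed across all age groups."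
--         ],
--         # Legal text
--         [
--             "The plaintiff alleges that the defendant breached the terms of the contract by failing to deliver the specified goods within the timeframe.",
--             "The court ruled that the statute of limitations had expired, thereby dismissing the case without further consideration of its merits."
--         ],
--         # Technical documentation
--         [
--             "To install the package, run 'pip install library-name' and import the required modules into your Python script.",
--             "The API provides several endpoints for data retrieval, each requiring authentication tokens that must be included in the request header."
--         ],
--         # Philosophical
--         [
--             "The question of whether consciousness is an emergent property or fundamental to reality remains one of philosophy's most enduring debates.",
--             "Freedom can be understood as either the absence of external constraints or the presence of meaningful choices aligned with one's values."
--         ],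
--         # Instructional
--         [
--             "When baking bread, ensure that the yeast is fully activated before incorporating it into the flour mixture to achieve proper rising.",
--             "To solve this type of differential equation, first identify whether it's separable, then isolate the variables on opposite sides of the equal sign."
--         ]
--     ]
--
--     # Generate samples by selecting from different text types
--     samples = []
--     while len(samples) < n:
--         for text_type in text_types:
--             for text in text_type:
--                 samples.append(text)
--                 if len(samples) >= n:
--                     break
--             if len(samples) >= n:
--                 break
--
--     return samples[:n]  # Ensure we return exactly n samples
-- ===== SOURCE B (Python) =====
-- def generate_sample_texts(n=100):
--     """Generate diverse sample texts for training"""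
--     # Flat list of the sample texts, in the same order A walks them
--     texts = [
--         'Neural networks process information through layers of interconnected nodes, each applying weights and activation functions to transform input data.',
--         'The transformer architecture revolutionized natural language processing by introducing self-attention mechanisms that capture long-range dependencies in text.',
--         'The old oak tree stood sentinel at the edge of the forest, its gnarled branches reaching skyward like ancient fingers.',
--         'Moonlight spilled across the quiet lake, turning the rippling water into a canvas of liquid silver.',
--         'Scientists announced today the discovery of a new exoplanet that may contain liquid water, raising hopes for finding extraterrestrial life.',
--         "Global markets rallied yesterday following the central bank's decision to lower interest rates in response to recent economic indicators.",
--         'Hey, did you catch that new movie last weekend? I thought the special effects were amazing but the plot was predictable.',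
--         "We should meet up for coffee sometime next week. I've been wanting to tell you about my recent trip to Japan.",
--         'The experiment yielded statistically significant results (p<0.01), suggesting a strong correlation between the variables under investigation.',
--         'This paper presents a comprehensive analysis of the socioeconomic factors contributing to urban development in post-industrial regions.',
--         'In 1776, representatives from the thirteen colonies signed the Declaration of Independence, formally announcing their separation from Britain.',
--         'The Roman Empire reached its greatest territorial extent under the rule of Trajan, encompassing vast regions around the Mediterranean Sea.',
--         'The quarterly financial report indicates a 12% increase in revenue, driven primarily by strong performance in emerging markets.',
--         'Our five-year strategic plan aims to diversify product offerings while maintaining our core commitment to sustainability and ethical sourcing.',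
--         'Patients presenting with these symptoms should be evaluated for possible autoimmune disorders, particularly those affecting the thyroid.',
--         'The study found that regular exercise significantly reduced the risk of cardiovascular disease, with benefits observed across all age groups.',
--         'The plaintiff alleges that the defendant breached the terms of the contract by failing to deliver the specified goods within the timeframe.',
--         'The court ruled that the statute of limitations had expired, thereby dismissing the case without further consideration of its merits.',
--         "To install the package, run 'pip install library-name' and import the required modules into your Python script.",
--         'The API provides several endpoints for data retrieval, each requiring authentication tokens that must be included in the request header.',
--         "The question of whether consciousness is an emergent property or fundamental to reality remains one of philosophy's most enduring debates.",
--         "Freedom can be understood as either the absence of external constraints or the presence of meaningful choices aligned with one's values.",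
--         'When baking bread, ensure that the yeast is fully activated before incorporating it into the flour mixture to achieve proper rising.',
--         "To solve this type of differential equation, first identify whether it's separable, then isolate the variables on opposite sides of the equal sign.",
--     ]
--     # Exactly n outputs by cyclic indexing
--     return [texts[i % len(texts)] for i in range(n)]
-- ===== Notes on version B (the rewrite author's own statement) =====
-- stated objective: simpler
-- what changed: Replaced the nested while/for/for loop with break-guards and a final slice by a one-line build: flatten the texts once and produce exactly n samples by cyclic indexing texts[i % len(texts)] over range(n).
import Mathlib
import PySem

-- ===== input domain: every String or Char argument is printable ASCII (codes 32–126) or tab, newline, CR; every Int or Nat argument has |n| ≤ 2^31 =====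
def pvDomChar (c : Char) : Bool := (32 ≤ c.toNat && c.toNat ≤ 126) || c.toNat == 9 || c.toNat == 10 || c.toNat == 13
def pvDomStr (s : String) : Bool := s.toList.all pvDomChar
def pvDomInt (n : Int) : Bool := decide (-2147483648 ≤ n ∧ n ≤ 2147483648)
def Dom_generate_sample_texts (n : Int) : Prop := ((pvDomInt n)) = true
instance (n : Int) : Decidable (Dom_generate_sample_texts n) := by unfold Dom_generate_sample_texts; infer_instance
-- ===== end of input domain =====

-- B replaces A's nested while/for/for cycling with break-guards by a single cyclic-indexing
-- comprehension over a flat list (objective: simpler).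

-- ===== PORT A =====
-- the nested text_types list, verbatim
def pvTextTypes : List (List String) := [
    ["Neural networks process information through layers of interconnected nodes, each applying weights and activation functions to transform input data.",
     "The transformer architecture revolutionized natural language processing by introducing self-attention mechanisms that capture long-range dependencies in text."],
    ["The old oak tree stood sentinel at the edge of the forest, its gnarled branches reaching skyward like ancient fingers.",
     "Moonlight spilled across the quiet lake, turning the rippling water into a canvas of liquid silver."],
    ["Scientists announced today the discovery of a new exoplanet that may contain liquid water, raising hopes for finding extraterrestrial life.",
     "Global markets rallied yesterday following the central bank's decision to lower interest rates in response to recent economic indicators."],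
    ["Hey, did you catch that new movie last weekend? I thought the special effects were amazing but the plot was predictable.",
     "We should meet up for coffee sometime next week. I've been wanting to tell you about my recent trip to Japan."],
    ["The experiment yielded statistically significant results (p<0.01), suggesting a strong correlation between the variables under investigation.",
     "This paper presents a comprehensive analysis of the socioeconomic factors contributing to urban development in post-industrial regions."],
    ["In 1776, representatives from the thirteen colonies signed the Declaration of Independence, formally announcing their separation from Britain.",
     "The Roman Empire reached its greatest territorial extent under the rule of Trajan, encompassing vast regions around the Mediterranean Sea."],
    ["The quarterly financial report indicates a 12% increase in revenue, driven primarily by strong performance in emerging markets.",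
     "Our five-year strategic plan aims to diversify product offerings while maintaining our core commitment to sustainability and ethical sourcing."],
    ["Patients presenting with these symptoms should be evaluated for possible autoimmune disorders, particularly those affecting the thyroid.",
     "The study found that regular exercise significantly reduced the risk of cardiovascular disease, with benefits observed across all age groups."],
    ["The plaintiff alleges that the defendant breached the terms of the contract by failing to deliver the specified goods within the timeframe.",
     "The court ruled that the statute of limitations had expired, thereby dismissing the case without further consideration of its merits."],
    ["To install the package, run 'pip install library-name' and import the required modules into your Python script.",
     "The API provides several endpoints for data retrieval, each requiring authentication tokens that must be included in the request header."],
    ["The question of whether consciousness is an emergent property or fundamental to reality remains one of philosophy's most enduring debates.",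
     "Freedom can be understood as either the absence of external constraints or the presence of meaningful choices aligned with one's values."],
    ["When baking bread, ensure that the yeast is fully activated before incorporating it into the flour mixture to achieve proper rising.",
     "To solve this type of differential equation, first identify whether it's separable, then isolate the variables on opposite sides of the equal sign."]]

-- inner 'for text in text_type' loop with its break-guard ('if len(samples) >= n: break')
def pvInnerFor (n : Int) (s : List String) (tt : List String) : List String :=
  tt.foldl (fun s2 t => if (s2.length : Int) ≥ n then s2 else s2 ++ [t]) s

-- one pass of the outer 'for text_type in text_types' loop with its break-guard
def pvPass (n : Int) (s : List String) : List String :=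
  pvTextTypes.foldl (fun s tt => if ((s.length : Int) ≥ n) then s else pvInnerFor n s tt) s

-- termination helpers for the 'while' loop (each pass strictly grows samples while len < n)
theorem pvInnerFor_le_length (n : Int) (tt : List String) : ∀ s : List String, s.length ≤ (pvInnerFor n s tt).length := by
  induction tt with
  | nil => intro s; simp [pvInnerFor]
  | cons t tt ih =>
    intro s
    simp only [pvInnerFor, List.foldl_cons]
    split
    · exact ih s
    · exact le_trans (by simp) (ih (s ++ [t]))

theorem pvFoldSteps_le_length (n : Int) (l : List (List String)) : ∀ s : List String,
    s.length ≤ (l.foldl (fun s tt => if ((s.length : Int) ≥ n) then s else pvInnerFor n s tt) s).length := by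
  induction l with
  | nil => intro s; simp
  | cons g l ih =>
    intro s
    simp only [List.foldl_cons]
    split
    · exact ih s
    · exact le_trans (pvInnerFor_le_length n g s) (ih (pvInnerFor n s g))

theorem pvPass_length_gt (n : Int) (s : List String) (h : (s.length : Int) < n) :
    s.length < (pvPass n s).length := by
  obtain ⟨t0, g0t, rest, hstruct⟩ : ∃ t0 g0t rest, pvTextTypes = (t0 :: g0t) :: rest := ⟨_, _, _, rfl⟩
  have hn : ¬ ((s.length : Int) ≥ n) := not_le.mpr h
  rw [pvPass, hstruct]
  simp only [List.foldl_cons, if_neg hn]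
  have h1 : pvInnerFor n s (t0 :: g0t) = pvInnerFor n (s ++ [t0]) g0t := by
    simp only [pvInnerFor, List.foldl_cons, if_neg hn]
  have h2 : s.length < (pvInnerFor n s (t0 :: g0t)).length := by
    rw [h1]
    calc s.length < (s ++ [t0]).length := by simp
      _ ≤ _ := pvInnerFor_le_length n g0t _
  exact lt_of_lt_of_le h2 (pvFoldSteps_le_length n rest _)

-- the 'while len(samples) < n' loop
def pvWhile (n : Int) (s : List String) : List String :=
  if h : (s.length : Int) < n then pvWhile n (pvPass n s) else s
termination_by (n - s.length).toNat
decreasing_by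
  have := pvPass_length_gt n s h
  omega

def generate_sample_texts (n : Int) : List String :=
  PySem.List.slice (pvWhile n []) none (some n)   -- samples[:n]

-- ===== PORT B =====
-- the flat texts list, verbatim from Source B
def pvFlat : List String := [
    "Neural networks process information through layers of interconnected nodes, each applying weights and activation functions to transform input data.",
    "The transformer architecture revolutionized natural language processing by introducing self-attention mechanisms that capture long-range dependencies in text.",
    "The old oak tree stood sentinel at the edge of the forest, its gnarled branches reaching skyward like ancient fingers.",
    "Moonlight spilled across the quiet lake, turning the rippling water into a canvas of liquid silver.",
    "Scientists announced today the discovery of a new exoplanet that may contain liquid water, raising hopes for finding extraterrestrial life.",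
    "Global markets rallied yesterday following the central bank's decision to lower interest rates in response to recent economic indicators.",
    "Hey, did you catch that new movie last weekend? I thought the special effects were amazing but the plot was predictable.",
    "We should meet up for coffee sometime next week. I've been wanting to tell you about my recent trip to Japan.",
    "The experiment yielded statistically significant results (p<0.01), suggesting a strong correlation between the variables under investigation.",
    "This paper presents a comprehensive analysis of the socioeconomic factors contributing to urban development in post-industrial regions.",
    "In 1776, representatives from the thirteen colonies signed the Declaration of Independence, formally announcing their separation from Britain.",
    "The Roman Empire reached its greatest territorial extent under the rule of Trajan, encompassing vast regions around the Mediterranean Sea.",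
    "The quarterly financial report indicates a 12% increase in revenue, driven primarily by strong performance in emerging markets.",
    "Our five-year strategic plan aims to diversify product offerings while maintaining our core commitment to sustainability and ethical sourcing.",
    "Patients presenting with these symptoms should be evaluated for possible autoimmune disorders, particularly those affecting the thyroid.",
    "The study found that regular exercise significantly reduced the risk of cardiovascular disease, with benefits observed across all age groups.",
    "The plaintiff alleges that the defendant breached the terms of the contract by failing to deliver the specified goods within the timeframe.",
    "The court ruled that the statute of limitations had expired, thereby dismissing the case without further consideration of its merits.",
    "To install the package, run 'pip install library-name' and import the required modules into your Python script.",
    "The API provides several endpoints for data retrieval, each requiring authentication tokens that must be included in the request header.",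
    "The question of whether consciousness is an emergent property or fundamental to reality remains one of philosophy's most enduring debates.",
    "Freedom can be understood as either the absence of external constraints or the presence of meaningful choices aligned with one's values.",
    "When baking bread, ensure that the yeast is fully activated before incorporating it into the flour mixture to achieve proper rising.",
    "To solve this type of differential equation, first identify whether it's separable, then isolate the variables on opposite sides of the equal sign."]

-- [texts[i % len(texts)] for i in range(n)]; the index i % 24 is always in range, so getD's
-- default is never used
def generate_sample_texts_alt (n : Int) : List String :=
  (PySem.List.pyRange 0 n 1).map
    (fun i => (PySem.List.pyGet? pvFlat (PySem.Int.mod i (pvFlat.length : Int))).getD "")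

-- ===== PRECONDITION & SPEC =====
def Spec_generate_sample_texts (n : Int) (out : List String) : Prop := out = generate_sample_texts_alt n
instance (n : Int) (out : List String) : Decidable (Spec_generate_sample_texts n out) := by unfold Spec_generate_sample_texts; infer_instance

-- ===== CLAIM (what is proved, stated in full; the proofs are below) =====
def Claim_equal_generate_sample_texts : Prop := ∀ (n : Int), Dom_generate_sample_texts n → Spec_generate_sample_texts n (generate_sample_texts n)

-- ===== LEMMAS AND PROOFS =====

-- first n elements of the infinite cyclic repetition of pvFlat (proof-side characterisation)
def pvCyc (m : Nat) : List String :=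
  if m ≤ 24 then pvFlat.take m else pvFlat ++ pvCyc (m - 24)
termination_by m
decreasing_by omega

theorem pvFlat_length : pvFlat.length = 24 := rfl

theorem pvCyc_zero : pvCyc 0 = [] := by rw [pvCyc]; simp

theorem pvCyc_length (m : Nat) : (pvCyc m).length = m := by
  induction m using pvCyc.induct with
  | case1 m h => rw [pvCyc, if_pos h]; rw [List.length_take, pvFlat_length]; omega
  | case2 m h ih => rw [pvCyc, if_neg h]; rw [List.length_append, pvFlat_length, ih]; omega

theorem pvCyc_getElem (m i : Nat) (hi : i < m) :
    (pvCyc m)[i]'(by rw [pvCyc_length]; exact hi)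
      = pvFlat[i % 24]'(by rw [pvFlat_length]; omega) := by
  induction m using pvCyc.induct generalizing i with
  | case1 m h =>
    have he : pvCyc m = pvFlat.take m := by rw [pvCyc, if_pos h]
    rw [List.getElem_of_eq he, List.getElem_take]
    congr 1
    omega
  | case2 m h ih =>
    have he : pvCyc m = pvFlat ++ pvCyc (m - 24) := by rw [pvCyc, if_neg h]
    rw [List.getElem_of_eq he]
    by_cases hi24 : i < 24
    · rw [List.getElem_append_left (by rw [pvFlat_length]; exact hi24)]
      congr 1
      omega
    · rw [List.getElem_append_right (by rw [pvFlat_length]; omega)]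
      have h2 : i - pvFlat.length = i - 24 := by rw [pvFlat_length]
      have h3 : (i - 24) % 24 = i % 24 := by omega
      simp only [pvFlat_length]
      rw [ih (i - 24) (by omega)]
      congr 1

-- the inner for-loop appends exactly the next (n - len) texts of its group
theorem pvInnerFor_eq (n : Int) (tt : List String) : ∀ s : List String,
    pvInnerFor n s tt = s ++ tt.take (n - s.length).toNat := by
  induction tt with
  | nil => intro s; simp [pvInnerFor]
  | cons t tt ih =>
    intro s
    by_cases h : (s.length : Int) ≥ n
    · have h0 : ((n : Int) - s.length).toNat = 0 := by omega
      simp only [pvInnerFor, List.foldl_cons, if_pos h]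
      rw [show List.foldl (fun s2 t => if (s2.length : Int) ≥ n then s2 else s2 ++ [t]) s tt
            = pvInnerFor n s tt from rfl, ih s, h0]
      simp
    · have hlen : (((s ++ [t]).length : Nat) : Int) = (s.length : Int) + 1 := by
        simp
      have h1 : ((n : Int) - s.length).toNat = ((n : Int) - (s ++ [t]).length).toNat + 1 := by
        simp only [List.length_append, List.length_singleton]; push_cast; omega
      simp only [pvInnerFor, List.foldl_cons, if_neg h]
      rw [show List.foldl (fun s2 t => if (s2.length : Int) ≥ n then s2 else s2 ++ [t]) (s ++ [t]) tt
            = pvInnerFor n (s ++ [t]) tt from rfl, ih (s ++ [t]), h1]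
      simp [List.take_succ_cons]

-- the outer for-loop appends exactly the next (n - len) texts of the flattened groups
theorem pvFold_eq (n : Int) : ∀ (gs : List (List String)) (s : List String),
    gs.foldl (fun s tt => if ((s.length : Int) ≥ n) then s else pvInnerFor n s tt) s
      = s ++ gs.flatten.take (n - s.length).toNat := by
  intro gs
  induction gs with
  | nil => intro s; simp
  | cons g gs ih =>
    intro s
    simp only [List.foldl_cons]
    by_cases h : (s.length : Int) ≥ n
    · rw [if_pos h, ih s]
      have h0 : ((n : Int) - s.length).toNat = 0 := by omega
      simp [h0]
    · rw [if_neg h, pvInnerFor_eq n g s, ih]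
      rw [List.flatten_cons, List.take_append]
      have hA : ((n : Int) - ((s ++ g.take (n - s.length).toNat).length : Nat)).toNat
          = ((n : Int) - s.length).toNat - g.length := by
        simp only [List.length_append, List.length_take]
        push_cast
        omega
      rw [hA, List.append_assoc]

theorem pvPass_eq (n : Int) (s : List String) :
    pvPass n s = s ++ pvFlat.take (n - s.length).toNat := by
  have hf : pvTextTypes.flatten = pvFlat := by rfl
  rw [pvPass, pvFold_eq, hf]

-- the while loop produces exactly the first (n - len) elements of the cyclic repetition
theorem pvWhile_eq (n : Int) (s : List String) :
    pvWhile n s = s ++ pvCyc (n - s.length).toNat := by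
  induction s using pvWhile.induct (n := n) with
  | case1 s h ih =>
    rw [pvWhile, dif_pos h, ih, pvPass_eq]
    have hA : ((n : Int) - ((s ++ pvFlat.take (n - s.length).toNat).length : Nat)).toNat
        = ((n : Int) - s.length).toNat - 24 := by
      simp only [List.length_append, List.length_take, pvFlat_length]
      push_cast
      omega
    rw [hA, List.append_assoc]
    congr 1
    by_cases h24 : ((n : Int) - s.length).toNat ≤ 24
    · have h0 : ((n : Int) - s.length).toNat - 24 = 0 := by omega
      rw [h0, pvCyc_zero, List.append_nil]
      conv_rhs => rw [pvCyc, if_pos h24]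
    · conv_rhs => rw [pvCyc, if_neg h24]
      rw [List.take_of_length_le (by rw [pvFlat_length]; omega)]
  | case2 s h =>
    rw [pvWhile, dif_neg h]
    have h0 : ((n : Int) - s.length).toNat = 0 := by omega
    rw [h0, pvCyc_zero, List.append_nil]

theorem pvA_eq (n : Int) : generate_sample_texts n = pvCyc n.toNat := by
  rw [generate_sample_texts, pvWhile_eq]
  simp only [List.length_nil, Nat.cast_zero, sub_zero, List.nil_append]
  by_cases h : 0 ≤ n
  · rw [PySem.List.slice_to _ h]
    exact List.take_of_length_le (le_of_eq (pvCyc_length n.toNat))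
  · have h0 : n.toNat = 0 := by omega
    rw [h0, pvCyc_zero]
    simp [PySem.List.slice]

theorem pvB_eq (n : Int) : generate_sample_texts_alt n = pvCyc n.toNat := by
  rw [generate_sample_texts_alt, PySem.List.pyRange_one]
  apply List.ext_getElem
  · simp [pvCyc_length]
  · intro i h1 h2
    simp only [List.getElem_map, List.getElem_range, zero_add]
    rw [pvFlat_length, PySem.Int.mod_natCast,
        PySem.List.pyGet?_ofNat pvFlat (i % 24) (by rw [pvFlat_length]; omega)]
    have hi : i < n.toNat := by
      simp only [List.length_map, List.length_range] at h1
      omega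
    rw [Option.getD_some, pvCyc_getElem n.toNat i hi]

-- ===== VERDICT (by name: the statement is the Claim_ definition above) =====
theorem generate_sample_texts_spec : Claim_equal_generate_sample_texts := by
  intro n _
  unfold Spec_generate_sample_texts
  rw [pvA_eq, pvB_eq]
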